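-- pv_equiv track=rewrite | github.com/Tallahasseeee/Lab1cpp | Lab7/Lab7.py | process
-- ===== SOURCE A (Python) =====
-- def process(*args):
--     A = args[0]
--     n = args[-1]
--     min = A[0]
--     max = A[0]
--     min_index = 0
--     max_index = 0
--     for i in range(0, n):
--         if A[i] > max:
--             max = A[i]
--             max_index = i
--         elif A[i] < min:
--             min = A[i]
--             min_index = i
--     A[max_index] = min
--     A[min_index] = max
--     return A
-- ===== SOURCE B (Python) =====
-- def process(*args):
--     A = args[0]
--     n = args[-1]
--     if n < 1:
--         return A
--     p = A[:n]
--     mx = max(p)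
--     mn = min(p)
--     mxi = p.index(mx)
--     mni = p.index(mn)
--     A[mxi] = mn
--     A[mni] = mx
--     return A
-- ===== Notes on version B (the rewrite author's own statement) =====
-- stated objective: simpler
-- what changed: Replaces the fused hand-rolled min/max-with-index tracking loop by library scans: take the prefix A[:n], compute max/min with max()/min(), find their first indices with list.index, then write the two cells.
import Mathlib
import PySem

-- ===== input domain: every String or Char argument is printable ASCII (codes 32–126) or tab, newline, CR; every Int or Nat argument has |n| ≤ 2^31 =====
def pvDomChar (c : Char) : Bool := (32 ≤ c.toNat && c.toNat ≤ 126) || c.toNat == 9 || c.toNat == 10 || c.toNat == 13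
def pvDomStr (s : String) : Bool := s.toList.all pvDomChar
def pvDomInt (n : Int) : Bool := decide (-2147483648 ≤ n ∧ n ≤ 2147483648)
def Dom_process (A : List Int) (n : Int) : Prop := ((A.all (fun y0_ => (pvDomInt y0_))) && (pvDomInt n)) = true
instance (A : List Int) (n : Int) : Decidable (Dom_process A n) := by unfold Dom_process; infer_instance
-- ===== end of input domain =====

-- B replaces A's fused min/max-with-index tracking loop by separate library scans (max/min of the
-- prefix, then their first-occurrence indices) before the two writes; objective: simpler.
-- Equivalence is about the RETURN value; both Pythons also mutate A in place identically on Pre_.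

-- ===== PORT A =====
-- loop state: (min, max, min_index, max_index); none = an IndexError already occurred
def processStep (A : List Int) (s : Option (Int × Int × Int × Int)) (i : Int) :
    Option (Int × Int × Int × Int) :=
  match s with
  | none => none
  | some (mn, mx, mni, mxi) =>
    match PySem.List.pyGet? A i with
    | none => none
    | some v =>
      if v > mx then some (mn, v, mni, i)
      else if v < mn then some (v, mx, i, mxi)
      else some (mn, mx, mni, mxi)

def process (A : List Int) (n : Int) : List Int :=
  match PySem.List.pyGet? A 0 with
  | none => A   -- IndexError on empty A; excluded by Pre_
  | some a0 =>
    match (PySem.List.pyRange 0 n 1).foldl (processStep A) (some (a0, a0, 0, 0)) with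
    | none => A -- IndexError when n > len(A); excluded by Pre_
    | some (mn, mx, mni, mxi) =>
      PySem.List.pySetD (PySem.List.pySetD A mxi mn) mni mx

-- ===== PORT B =====
def process_alt (A : List Int) (n : Int) : List Int :=
  if n < 1 then A
  else
    let p := PySem.List.slice A none (some n)
    match PySem.List.max? p (fun x => x), PySem.List.min? p (fun x => x) with
    | some mx, some mn =>
      match PySem.List.index? p mx, PySem.List.index? p mn with
      | some mxi, some mni =>
        PySem.List.pySetD (PySem.List.pySetD A (mxi : Int) mn) ((mni : Int)) mx
      | _, _ => A   -- unreachable: mx, mn are members of p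
    | _, _ => A     -- ValueError: max()/min() of an empty prefix; excluded by Pre_

-- ===== PRECONDITION & SPEC =====
-- A raises IndexError when A is empty (initial read A[0]) or when n > len(A) (read inside the loop).
def Pre_process (A : List Int) (n : Int) : Prop := A ≠ [] ∧ n ≤ (A.length : Int)
instance (A : List Int) (n : Int) : Decidable (Pre_process A n) := by
  unfold Pre_process; infer_instance
def pvWitness_process : List Int × Int := ([3, 1, 2], 3)

def Spec_process (A : List Int) (n : Int) (out : List Int) : Prop := out = process_alt A n
instance (A : List Int) (n : Int) (out : List Int) : Decidable (Spec_process A n out) := by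
  unfold Spec_process; infer_instance

-- ===== CLAIM (what is proved, stated in full; the proofs are below) =====
def Claim_equal_process : Prop :=
  ∀ (A : List Int) (n : Int), Dom_process A n → Pre_process A n → Spec_process A n (process A n)

-- ===== LEMMAS AND PROOFS =====

-- min() of a list with one element appended
theorem min?_id_append_singleton (xs : List Int) (v mn : Int)
    (h : PySem.List.min? xs (fun x => x) = some mn) :
    PySem.List.min? (xs ++ [v]) (fun x => x) = some (min mn v) := by
  cases xs with
  | nil => simp [PySem.List.min?] at h
  | cons x t =>
    rw [PySem.List.min?_id_cons] at h
    rw [List.cons_append, PySem.List.min?_id_cons]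
    simp only [List.foldl_append, List.foldl_cons, List.foldl_nil]
    injection h with h; rw [h]

-- max() of a list with one element appended
theorem max?_id_append_singleton (xs : List Int) (v mx : Int)
    (h : PySem.List.max? xs (fun x => x) = some mx) :
    PySem.List.max? (xs ++ [v]) (fun x => x) = some (max mx v) := by
  cases xs with
  | nil => simp [PySem.List.max?] at h
  | cons x t =>
    rw [PySem.List.max?_id_cons] at h
    rw [List.cons_append, PySem.List.max?_id_cons]
    simp only [List.foldl_append, List.foldl_cons, List.foldl_nil]
    injection h with h; rw [h]

-- writing back the head it already has is a no-op
theorem pySetD_zero_head (a : Int) (t : List Int) :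
    PySem.List.pySetD (a :: t) 0 a = a :: t := by
  simp [PySem.List.pySetD, PySem.List.pySet?, PySem.List.pyIdx?]

-- the loop invariant: after scanning the first m elements, A's state is exactly the
-- min/max of the prefix with their first-occurrence indices — B's four quantities.
theorem process_loop_inv (A : List Int) (a0 : Int) (h0 : A[0]? = some a0)
    (m : Nat) (hm : 1 ≤ m) (hlen : m ≤ A.length) :
    ∃ (mn mx : Int) (mni mxi : Nat),
      (PySem.List.pyRange 0 (m : Int) 1).foldl (processStep A) (some (a0, a0, 0, 0))
        = some (mn, mx, (mni : Int), (mxi : Int)) ∧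
      PySem.List.min? (A.take m) (fun x => x) = some mn ∧
      PySem.List.max? (A.take m) (fun x => x) = some mx ∧
      PySem.List.index? (A.take m) mn = some mni ∧
      PySem.List.index? (A.take m) mx = some mxi := by
  induction m, hm using Nat.le_induction with
  | base =>
    have h1 : ((1 : Nat) : Int) = 0 + 1 := by norm_num
    rw [h1, PySem.List.pyRange_one_singleton]
    have htake : A.take 1 = [a0] := by
      cases A with
      | nil => simp at h0
      | cons a t => simp at h0; simp [h0]
    refine ⟨a0, a0, 0, 0, ?_, ?_, ?_, ?_, ?_⟩
    · simp [processStep, PySem.List.pyGet?_zero, h0]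
    · rw [htake, PySem.List.min?_id_cons]; simp
    · rw [htake, PySem.List.max?_id_cons]; simp
    · rw [htake, PySem.List.index?_cons_self]
    · rw [htake, PySem.List.index?_cons_self]
  | succ m hm ih =>
    have hmlt : m < A.length := by omega
    obtain ⟨mn, mx, mni, mxi, hfold, hmin, hmax, himn, himx⟩ := ih (by omega)
    set p := A.take m with hp
    set v := A[m] with hv
    have hpg : PySem.List.pyGet? A (m : Int) = some v := by
      rw [PySem.List.pyGet?_natCast, List.getElem?_eq_getElem hmlt]
    have hplen : p.length = m := by simp [hp, List.length_take]; omega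
    have hrange : PySem.List.pyRange 0 ((m + 1 : Nat) : Int) 1
        = PySem.List.pyRange 0 (m : Int) 1 ++ [(m : Int)] := by
      push_cast
      exact PySem.List.pyRange_one_succ_right (by positivity)
    have htake : A.take (m + 1) = p ++ [v] := by
      rw [List.take_add_one, List.getElem?_eq_getElem hmlt]; rfl
    have hmem_mn : mn ∈ p := PySem.List.min?_mem hmin
    have hmem_mx : mx ∈ p := PySem.List.max?_mem hmax
    have hminle : ∀ y ∈ p, mn ≤ y := PySem.List.min?_isMin hmin
    have hlemax : ∀ y ∈ p, y ≤ mx := PySem.List.max?_isMax hmax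
    have hmnmx : mn ≤ mx := hlemax mn hmem_mn
    have hmin' := min?_id_append_singleton p v mn hmin
    have hmax' := max?_id_append_singleton p v mx hmax
    rw [hrange, List.foldl_append, hfold, htake]
    simp only [List.foldl_cons, List.foldl_nil]
    by_cases hv1 : v > mx
    · have hvnp : v ∉ p := fun hmem => absurd (hlemax v hmem) (by omega)
      refine ⟨mn, v, mni, m, ?_, ?_, ?_, ?_, ?_⟩
      · simp [processStep, hpg, hv1]
      · rw [hmin']; congr 1; omega
      · rw [hmax']; congr 1; omega
      · rw [PySem.List.index?_append_of_mem _ hmem_mn, himn]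
      · rw [PySem.List.index?_append_singleton_self p v hvnp, hplen]
    · by_cases hv2 : v < mn
      · have hvnp : v ∉ p := fun hmem => absurd (hminle v hmem) (by omega)
        refine ⟨v, mx, m, mxi, ?_, ?_, ?_, ?_, ?_⟩
        · simp [processStep, hpg, hv1, hv2]
        · rw [hmin']; congr 1; omega
        · rw [hmax']; congr 1; omega
        · rw [PySem.List.index?_append_singleton_self p v hvnp, hplen]
        · rw [PySem.List.index?_append_of_mem _ hmem_mx, himx]
      · refine ⟨mn, mx, mni, mxi, ?_, ?_, ?_, ?_, ?_⟩
        · simp [processStep, hpg, hv1, hv2]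
        · rw [hmin']; congr 1; omega
        · rw [hmax']; congr 1; omega
        · rw [PySem.List.index?_append_of_mem _ hmem_mn, himn]
        · rw [PySem.List.index?_append_of_mem _ hmem_mx, himx]

theorem process_eq (A : List Int) (n : Int) (hne : A ≠ []) (hle : n ≤ (A.length : Int)) :
    process A n = process_alt A n := by
  obtain ⟨a, t, rfl⟩ : ∃ a t, A = a :: t := by
    cases A with
    | nil => exact absurd rfl hne
    | cons a t => exact ⟨a, t, rfl⟩
  by_cases hn : n < 1
  · rw [process_alt, if_pos hn]
    rw [process]
    simp only [PySem.List.pyGet?_zero_cons]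
    rw [PySem.List.pyRange_one_eq_nil (by omega)]
    simp only [List.foldl_nil]
    rw [pySetD_zero_head, pySetD_zero_head]
  · have hn0 : (0 : Int) ≤ n := by omega
    set m := n.toNat with hm
    have hmn : (m : Int) = n := Int.toNat_of_nonneg hn0
    have hm1 : 1 ≤ m := by omega
    have hmlen : m ≤ (a :: t).length := by omega
    obtain ⟨mn, mx, mni, mxi, hfold, hmin, hmax, himn, himx⟩ :=
      process_loop_inv (a :: t) a rfl m hm1 hmlen
    rw [process]
    simp only [PySem.List.pyGet?_zero_cons]
    rw [← hmn, hfold]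
    rw [process_alt, if_neg (show ¬ ((m : Int) < 1) by omega)]
    have hslice : PySem.List.slice (a :: t) none (some ((m : Nat) : Int)) = (a :: t).take m :=
      PySem.List.slice_to_natCast _ _
    simp only [hslice, hmax, hmin, himx, himn]

-- ===== VERDICT (by name: the statement is the Claim_ definition above) =====
theorem process_spec : Claim_equal_process := by
  intro A n _ hpre
  exact process_eq A n hpre.1 hpre.2
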